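-- pv_equiv track=rewrite | github.com/maemreyo/learning-content-specifier | src/lcs_cli/proficiency/normalize.py | _normalize_cefr_values
-- ===== SOURCE A (Python) =====
-- from typing import Any
--
-- CEFR_ORDER = ["A1", "A2", "B1", "B2", "C1", "C2"]
--
-- def _normalize_cefr_values(values: list[str]) -> dict[str, Any]:
--     normalized = [v.strip().upper() for v in values if isinstance(v, str) and v.strip()]
--     normalized = [v for v in normalized if v in CEFR_ORDER]
--     if not normalized:
--         return {}
--     if len(set(normalized)) == 1:
--         return {"value": normalized[0]}
--     indices = sorted(CEFR_ORDER.index(v) for v in set(normalized))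
--     return {"min": CEFR_ORDER[indices[0]], "max": CEFR_ORDER[indices[-1]]}
-- ===== SOURCE B (Python) =====
-- CEFR_ORDER = ["A1", "A2", "B1", "B2", "C1", "C2"]
--
-- def _normalize_cefr_values(values: list[str]) -> dict:
--     mn = mx = None
--     for v in values:
--         if not isinstance(v, str):
--             continue
--         u = v.strip().upper()
--         if u not in CEFR_ORDER:
--             continue
--         i = CEFR_ORDER.index(u)
--         if mn is None:
--             mn = mx = i
--         else:
--             if i < mn:
--                 mn = i
--             if i > mx:
--                 mx = i
--     if mn is None:
--         return {}
--     if mn == mx: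
--         return {"value": CEFR_ORDER[mn]}
--     return {"min": CEFR_ORDER[mn], "max": CEFR_ORDER[mx]}
-- ===== Notes on version B (the rewrite author's own statement) =====
-- stated objective: alternative
-- what changed: Replaces A's build-filter-dedup-sort pipeline (two comprehensions, a set, sorted indices) by a single pass over values that keeps running min/max CEFR indices and reconstructs the result from them.
import Mathlib
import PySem

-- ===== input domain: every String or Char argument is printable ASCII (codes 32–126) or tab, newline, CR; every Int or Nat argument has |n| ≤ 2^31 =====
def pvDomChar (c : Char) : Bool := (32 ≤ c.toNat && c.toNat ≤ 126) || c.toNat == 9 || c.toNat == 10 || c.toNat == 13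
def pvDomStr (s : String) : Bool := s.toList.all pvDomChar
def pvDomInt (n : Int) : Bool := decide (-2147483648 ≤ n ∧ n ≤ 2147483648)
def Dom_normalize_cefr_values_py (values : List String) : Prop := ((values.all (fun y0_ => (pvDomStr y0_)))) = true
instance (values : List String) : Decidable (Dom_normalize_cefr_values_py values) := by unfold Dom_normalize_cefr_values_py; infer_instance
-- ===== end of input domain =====

-- B replaces filter/dedup/sort with a single pass keeping running min/max CEFR indices (objective: alternative).

-- ===== PORT A =====
def CEFR_ORDER : List String := ["A1", "A2", "B1", "B2", "C1", "C2"]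

-- CEFR_ORDER.index(v): Python would raise ValueError when v is absent; A only calls it on
-- members of CEFR_ORDER, so the .getD 0 default is never used.
def cefrIndex (v : String) : Nat := (PySem.List.index? CEFR_ORDER v).getD 0

def normalize_cefr_values_py (values : List String) : List (String × String) :=
  -- normalized = [v.strip().upper() for v in values if isinstance(v, str) and v.strip()]
  let normalized := (values.filter (fun v => PySem.Str.strip v ≠ "")).map
      (fun v => PySem.Str.upper (PySem.Str.strip v))
  -- normalized = [v for v in normalized if v in CEFR_ORDER]
  let normalized := normalized.filter (fun v => CEFR_ORDER.contains v)
  if normalized = [] then []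
  else
    let s : PySem.Set String := PySem.Set.ofList normalized
    if PySem.Set.len s = 1 then
      [("value", PySem.List.pyGetD normalized 0 "")]
    else
      let indices := PySem.List.sorted (s.map cefrIndex) (fun x => x) false
      [("min", PySem.List.pyGetD CEFR_ORDER ((PySem.List.pyGetD indices (0 : Int) 0 : Nat) : Int) ""),
       ("max", PySem.List.pyGetD CEFR_ORDER ((PySem.List.pyGetD indices (-1 : Int) 0 : Nat) : Int) "")]

-- ===== PORT B =====
def altStep (acc : Option (Nat × Nat)) (v : String) : Option (Nat × Nat) :=
  let u := PySem.Str.upper (PySem.Str.strip v)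
  if CEFR_ORDER.contains u then
    let i := (PySem.List.index? CEFR_ORDER u).getD 0
    match acc with
    | none => some (i, i)
    | some (mn, mx) => some ((if i < mn then i else mn), (if mx < i then i else mx))
  else acc

def normalize_cefr_values_py_alt (values : List String) : List (String × String) :=
  match values.foldl altStep none with
  | none => []
  | some (mn, mx) =>
    if mn = mx then [("value", PySem.List.pyGetD CEFR_ORDER ((mn : Nat) : Int) "")]
    else [("min", PySem.List.pyGetD CEFR_ORDER ((mn : Nat) : Int) ""),
          ("max", PySem.List.pyGetD CEFR_ORDER ((mx : Nat) : Int) "")]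

-- ===== PRECONDITION & SPEC =====
def Spec_normalize_cefr_values_py (values : List String) (out : List (String × String)) : Prop := out = normalize_cefr_values_py_alt values
instance (values : List String) (out : List (String × String)) : Decidable (Spec_normalize_cefr_values_py values out) := by unfold Spec_normalize_cefr_values_py; infer_instance

-- ===== CLAIM (what is proved, stated in full; the proofs are below) =====
def Claim_equal_normalize_cefr_values_py : Prop := ∀ (values : List String), Dom_normalize_cefr_values_py values → Spec_normalize_cefr_values_py values (normalize_cefr_values_py values)

-- ===== LEMMAS AND PROOFS =====

-- the list of valid tokens, in order
def toks (values : List String) : List String :=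
  values.filterMap (fun v =>
    if CEFR_ORDER.contains (PySem.Str.upper (PySem.Str.strip v)) then
      some (PySem.Str.upper (PySem.Str.strip v))
    else none)

lemma toks_eq_A (values : List String) :
    ((values.filter (fun v => PySem.Str.strip v ≠ "")).map
        (fun v => PySem.Str.upper (PySem.Str.strip v))).filter (fun v => CEFR_ORDER.contains v)
      = toks values := by
  induction values with
  | nil => rfl
  | cons v vs ih =>
    by_cases h : PySem.Str.strip v = ""
    · have hu : PySem.Str.upper (PySem.Str.strip v) = "" := by rw [h]; rfl
      have hcne : ("" : String) ∉ CEFR_ORDER := by decide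
      simp only [toks, List.filterMap_cons, List.filter_cons] at ih ⊢
      simpa [h, hu, hcne] using ih
    · by_cases hc : CEFR_ORDER.contains (PySem.Str.upper (PySem.Str.strip v)) = true
      · have hcm : PySem.Str.upper (PySem.Str.strip v) ∈ CEFR_ORDER := List.contains_iff_mem.mp hc
        simp only [toks, List.filterMap_cons, List.filter_cons] at ih ⊢
        simpa [h, hcm] using ih
      · have hcm : PySem.Str.upper (PySem.Str.strip v) ∉ CEFR_ORDER :=
          fun hm => hc (List.contains_iff_mem.mpr hm)
        simp only [toks, List.filterMap_cons, List.filter_cons] at ih ⊢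
        simpa [h, hcm] using ih

lemma mem_toks_contains {values : List String} {u : String} (h : u ∈ toks values) :
    CEFR_ORDER.contains u = true := by
  simp only [toks, List.mem_filterMap] at h
  obtain ⟨v, -, hv⟩ := h
  by_cases hc : CEFR_ORDER.contains (PySem.Str.upper (PySem.Str.strip v)) = true
  · rw [if_pos hc, Option.some.injEq] at hv
    rw [← hv]
    exact hc
  · rw [if_neg hc] at hv
    cases hv

-- the six-token facts
lemma contains_cases {u : String} (h : CEFR_ORDER.contains u = true) :
    u = "A1" ∨ u = "A2" ∨ u = "B1" ∨ u = "B2" ∨ u = "C1" ∨ u = "C2" := by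
  have hm : u ∈ CEFR_ORDER := by simpa using h
  simpa [CEFR_ORDER] using hm

set_option maxHeartbeats 1000000 in
lemma get_cefrIndex {u : String} (h : CEFR_ORDER.contains u = true) :
    PySem.List.pyGetD CEFR_ORDER ((cefrIndex u : Nat) : Int) "" = u := by
  rcases contains_cases h with h' | h' | h' | h' | h' | h' <;> subst h' <;> decide

lemma cefrIndex_inj {u v : String} (hu : CEFR_ORDER.contains u = true)
    (hv : CEFR_ORDER.contains v = true) (h : cefrIndex u = cefrIndex v) : u = v := by
  have h1 := get_cefrIndex hu
  have h2 := get_cefrIndex hv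
  rw [← h1, ← h2, h]

-- the pure min/max step on indices
def minmaxStep (acc : Option (Nat × Nat)) (i : Nat) : Option (Nat × Nat) :=
  match acc with
  | none => some (i, i)
  | some (mn, mx) => some ((if i < mn then i else mn), (if mx < i then i else mx))

lemma altStep_pos (acc : Option (Nat × Nat)) (v : String)
    (hc : CEFR_ORDER.contains (PySem.Str.upper (PySem.Str.strip v)) = true) :
    altStep acc v = minmaxStep acc (cefrIndex (PySem.Str.upper (PySem.Str.strip v))) := by
  rcases acc with _ | ⟨mn, mx⟩
  · simp only [altStep, minmaxStep]
    rw [if_pos hc]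
    rfl
  · simp only [altStep, minmaxStep]
    rw [if_pos hc]
    rfl

-- B's fold over values is a fold over the valid indices
lemma foldl_altStep (values : List String) (acc : Option (Nat × Nat)) :
    values.foldl altStep acc
      = ((toks values).map cefrIndex).foldl minmaxStep acc := by
  induction values generalizing acc with
  | nil => rfl
  | cons v vs ih =>
    by_cases hc : CEFR_ORDER.contains (PySem.Str.upper (PySem.Str.strip v)) = true
    · have htoks : toks (v :: vs) = PySem.Str.upper (PySem.Str.strip v) :: toks vs := by
        simp only [toks, List.filterMap_cons]
        rw [if_pos hc]
      rw [List.foldl_cons, htoks, List.map_cons, List.foldl_cons, altStep_pos acc v hc, ih]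
    · have htoks : toks (v :: vs) = toks vs := by
        simp only [toks, List.filterMap_cons]
        rw [if_neg hc]
      have hstep : altStep acc v = acc := by
        simp only [altStep]
        rw [if_neg hc]
      rw [List.foldl_cons, hstep, htoks, ih]

-- the fold computes running min/max
lemma foldl_minmax (ks : List Nat) (mn mx : Nat) :
    ks.foldl minmaxStep (some (mn, mx)) = some (ks.foldl min mn, ks.foldl max mx) := by
  induction ks generalizing mn mx with
  | nil => rfl
  | cons i t ih =>
    have h1 : (if i < mn then i else mn) = min mn i := by split_ifs with h <;> omega
    have h2 : (if mx < i then i else mx) = max mx i := by split_ifs with h <;> omega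
    have hstep : minmaxStep (some (mn, mx)) i = some (min mn i, max mx i) := by
      simp only [minmaxStep, h1, h2]
    simp only [List.foldl_cons, hstep, ih]

-- dedup commutes with cefrIndex, which is injective on CEFR members
lemma dedup_map (l : List String) (hl : ∀ u ∈ l, CEFR_ORDER.contains u = true) :
    (PySem.Set.ofList l).map cefrIndex = PySem.Set.ofList (l.map cefrIndex) := by
  induction l using List.reverseRecOn with
  | nil => rfl
  | append_singleton l x ih =>
    have hl' : ∀ u ∈ l, CEFR_ORDER.contains u = true :=
      fun u hu => hl u (List.mem_append_left _ hu)
    have hx : CEFR_ORDER.contains x = true := hl x (by simp)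
    have e1 : PySem.Set.ofList (l ++ [x]) = PySem.Set.add (PySem.Set.ofList l) x := by
      simp [PySem.Set.ofList_eq_foldl, List.foldl_append]
    have e2 : PySem.Set.ofList (l.map cefrIndex ++ [cefrIndex x])
        = PySem.Set.add (PySem.Set.ofList (l.map cefrIndex)) (cefrIndex x) := by
      simp [PySem.Set.ofList_eq_foldl, List.foldl_append]
    rw [e1, List.map_append, List.map_singleton, e2, ← ih hl']
    by_cases hm : x ∈ PySem.Set.ofList l
    · have hml : x ∈ l := (PySem.Set.mem_ofList l x).mp hm
      have hex : ∃ a ∈ l, cefrIndex a = cefrIndex x := ⟨x, hml, rfl⟩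
      simp [PySem.Set.add, PySem.Set.contains, hml, hex]
    · have hml : x ∉ l := fun hx' => hm ((PySem.Set.mem_ofList l x).mpr hx')
      have hex : ¬ ∃ a ∈ l, cefrIndex a = cefrIndex x := by
        rintro ⟨a, ha, hax⟩
        have hax' : a = x := cefrIndex_inj (hl' a ha) hx hax
        exact hml (hax' ▸ ha)
      simp [PySem.Set.add, PySem.Set.contains, hml, hex, List.map_append]

lemma ofList_const {u : String} {ts : List String} (h : ∀ t ∈ ts, t = u) :
    PySem.Set.ofList (u :: ts) = [u] := by
  have key : ∀ (ts : List String), (∀ t ∈ ts, t = u) → ts.foldl PySem.Set.add [u] = [u] := by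
    intro ts
    induction ts with
    | nil => intro _; rfl
    | cons t ts' ih =>
      intro h'
      have ht : t = u := h' t (by simp)
      have hadd : PySem.Set.add [u] t = [u] := by
        subst ht; simp [PySem.Set.add, PySem.Set.contains]
      simp only [List.foldl_cons, hadd]
      exact ih (fun t' ht' => h' t' (by simp [ht']))
  rw [PySem.Set.ofList_eq_foldl, List.foldl_cons]
  have hadd0 : PySem.Set.add ([] : List String) u = [u] := by
    simp [PySem.Set.add, PySem.Set.contains]
  rw [hadd0]
  exact key ts h

-- in a Pairwise-(≤) list, getLast? is an upper bound
lemma getLast_ub : ∀ {l : List Nat}, l.Pairwise (· ≤ ·) → ∀ {x : Nat}, x ∈ l →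
    ∀ y, l.getLast? = some y → x ≤ y := by
  intro l
  induction l with
  | nil => intro _ x hx; cases hx
  | cons a t ih =>
    intro h x hx y hy
    rcases List.pairwise_cons.mp h with ⟨ha, ht⟩
    cases t with
    | nil =>
      simp at hx hy; omega
    | cons b t' =>
      have hy' : (b :: t').getLast? = some y := by rwa [List.getLast?_cons_cons] at hy
      rcases List.mem_cons.mp hx with rfl | hx'
      · have hb : x ≤ b := ha b (by simp)
        have hby := ih ht (by simp : b ∈ b :: t') y hy'
        omega
      · exact ih ht hx' y hy'

theorem equal_aux (values : List String) :
    normalize_cefr_values_py values = normalize_cefr_values_py_alt values := by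
  simp only [normalize_cefr_values_py, normalize_cefr_values_py_alt]
  rw [toks_eq_A, foldl_altStep]
  cases htk : toks values with
  | nil => simp
  | cons u ts =>
    have hall : ∀ t ∈ u :: ts, CEFR_ORDER.contains t = true := by
      intro t ht; exact mem_toks_contains (htk ▸ ht)
    have hu : CEFR_ORDER.contains u = true := hall u (by simp)
    simp only [List.map_cons, List.foldl_cons]
    rw [show minmaxStep none (cefrIndex u) = some (cefrIndex u, cefrIndex u) from rfl]
    rw [foldl_minmax]
    set k := cefrIndex u with hk
    set ksr := ts.map cefrIndex with hksr
    set mn := ksr.foldl min k with hmn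
    set mx := ksr.foldl max k with hmx
    change _ = (if mn = mx then [("value", PySem.List.pyGetD CEFR_ORDER ((mn : Nat) : Int) "")]
      else [("min", PySem.List.pyGetD CEFR_ORDER ((mn : Nat) : Int) ""),
            ("max", PySem.List.pyGetD CEFR_ORDER ((mx : Nat) : Int) "")])
    have hmn_le : ∀ i ∈ k :: ksr, mn ≤ i := by
      intro i hi
      rcases List.mem_cons.mp hi with rfl | hi'
      · exact (PySem.List.foldl_min_le ksr k).1
      · exact (PySem.List.foldl_min_le ksr k).2 i hi'
    have hmx_ge : ∀ i ∈ k :: ksr, i ≤ mx := by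
      intro i hi
      rcases List.mem_cons.mp hi with rfl | hi'
      · exact (PySem.List.le_foldl_max ksr k).1
      · exact (PySem.List.le_foldl_max ksr k).2 i hi'
    have hmn_mem : mn ∈ k :: ksr := by
      rcases PySem.List.foldl_min_mem ksr k with h | h
      · rw [hmn, h]; exact List.mem_cons_self ..
      · exact List.mem_cons_of_mem _ h
    have hmx_mem : mx ∈ k :: ksr := by
      rcases PySem.List.foldl_max_mem ksr k with h | h
      · rw [hmx, h]; exact List.mem_cons_self ..
      · exact List.mem_cons_of_mem _ h
    have hidx : ∀ i ∈ k :: ksr, ∃ t ∈ u :: ts, i = cefrIndex t := by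
      intro i hi
      rcases List.mem_cons.mp hi with rfl | hi'
      · exact ⟨u, by simp, hk⟩
      · obtain ⟨t, ht, hti⟩ := List.mem_map.mp (hksr ▸ hi')
        exact ⟨t, List.mem_cons_of_mem _ ht, hti.symm⟩
    have hne : ¬ (u :: ts = []) := by simp
    rw [if_neg hne]
    by_cases hcase : mn = mx
    · -- all valid indices equal, so all tokens equal u and the set is a singleton
      have hieq : ∀ i ∈ k :: ksr, i = k := by
        intro i hi
        have h1 := hmn_le i hi
        have h2 := hmx_ge i hi
        have h3 := hmn_le k (List.mem_cons_self ..)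
        have h4 := hmx_ge k (List.mem_cons_self ..)
        omega
      have hteq : ∀ t ∈ ts, t = u := by
        intro t ht
        have hmemk : cefrIndex t ∈ k :: ksr := by
          apply List.mem_cons_of_mem
          rw [hksr]; exact List.mem_map.mpr ⟨t, ht, rfl⟩
        have hik := hieq _ hmemk
        rw [hk] at hik
        exact cefrIndex_inj (hall t (List.mem_cons_of_mem _ ht)) hu hik
      have hset : PySem.Set.ofList (u :: ts) = [u] := ofList_const hteq
      have hmn_k : mn = k := hieq mn hmn_mem
      rw [hset, if_pos (by simp [PySem.Set.len] : PySem.Set.len ([u] : List String) = 1)]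
      rw [if_pos hcase, PySem.List.pyGetD_zero_cons, hmn_k, hk, get_cefrIndex hu]
    · -- min ≠ max: the set has at least two elements
      have hlen : ¬ (PySem.Set.len (PySem.Set.ofList (u :: ts)) = 1) := by
        intro hlen1
        have hlen2 : (PySem.Set.ofList (u :: ts)).length = 1 := by
          simp only [PySem.Set.len] at hlen1
          exact_mod_cast hlen1
        obtain ⟨w, hw⟩ := List.length_eq_one_iff.mp hlen2
        have hmem : ∀ t ∈ u :: ts, t = w := by
          intro t ht
          have hmem2 : t ∈ PySem.Set.ofList (u :: ts) := (PySem.Set.mem_ofList _ _).mpr ht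
          rw [hw] at hmem2
          simpa using hmem2
        obtain ⟨t1, ht1, he1⟩ := hidx mn hmn_mem
        obtain ⟨t2, ht2, he2⟩ := hidx mx hmx_mem
        rw [hmem t1 ht1] at he1
        rw [hmem t2 ht2] at he2
        exact hcase (he1.trans he2.symm)
      rw [if_neg hlen, if_neg hcase]
      rw [dedup_map _ hall]
      have hof_ne : PySem.Set.ofList ((u :: ts).map cefrIndex) ≠ [] := by
        intro hcon
        have hkm : k ∈ PySem.Set.ofList ((u :: ts).map cefrIndex) := by
          apply (PySem.Set.mem_ofList _ _).mpr
          rw [List.map_cons, ← hk]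
          exact List.mem_cons_self ..
        rw [hcon] at hkm; cases hkm
      have hss_ne : PySem.List.sorted (PySem.Set.ofList ((u :: ts).map cefrIndex))
          (fun x => x) false ≠ [] :=
        fun hcon => hof_ne ((PySem.List.sorted_eq_nil_iff _ _ _).mp hcon)
      set ss := PySem.List.sorted (PySem.Set.ofList ((u :: ts).map cefrIndex)) (fun x => x) false
        with hss
      have hmem_ss : ∀ i, i ∈ ss ↔ i ∈ k :: ksr := by
        intro i
        rw [hss, PySem.List.mem_sorted, PySem.Set.mem_ofList]
        rw [List.map_cons, ← hk, ← hksr]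
      have hpw : ss.Pairwise (fun a b => a ≤ b) := by
        have hpw0 := PySem.List.sorted_pairwise
          (xs := PySem.Set.ofList ((u :: ts).map cefrIndex)) (key := fun x => x)
        simpa [hss] using hpw0
      cases hssc : ss with
      | nil => exact absurd hssc hss_ne
      | cons m r =>
        have hm_min : m = mn := by
          have h1 : ∀ y ∈ PySem.Set.ofList ((u :: ts).map cefrIndex), m ≤ y := by
            intro y hy
            exact PySem.List.key_head_sorted_le _ _ (hss.symm.trans hssc) y hy
          have h2 : m ≤ mn := by
            apply h1
            apply (PySem.Set.mem_ofList _ _).mpr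
            rw [List.map_cons, ← hk, ← hksr]
            exact hmn_mem
          have h3 : mn ≤ m :=
            hmn_le m ((hmem_ss m).mp (by rw [hssc]; exact List.mem_cons_self ..))
          omega
        have hmx_in : mx ∈ m :: r := by rw [← hssc]; exact (hmem_ss mx).mpr hmx_mem
        have hlast : (m :: r).getLast (by simp) = mx := by
          have hlast? : (m :: r).getLast? = some ((m :: r).getLast (by simp)) :=
            List.getLast?_eq_some_getLast (by simp)
          have hub : mx ≤ (m :: r).getLast (by simp) :=
            getLast_ub (hssc ▸ hpw) hmx_in _ hlast?
          have hmem_last : (m :: r).getLast (by simp) ∈ k :: ksr := by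
            apply (hmem_ss _).mp
            rw [hssc]
            exact List.getLast_mem _
          have hub2 := hmx_ge _ hmem_last
          omega
        rw [PySem.List.pyGetD_zero_cons, PySem.List.pyGetD_neg_one (m :: r) 0 (by simp),
          hlast, hm_min]

-- ===== VERDICT (by name: the statement is the Claim_ definition above) =====
theorem normalize_cefr_values_py_spec : Claim_equal_normalize_cefr_values_py := by
  intro values _
  show _ = _
  exact equal_aux values
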